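-- pv_equiv track=rewrite | github.com/coregee/adventofcode | 12.py | fence_cost
-- ===== SOURCE A (Python) =====
-- def fence_cost(section):
--     """Takes set of (i, j) tuples. Returns cost of fencing them."""
--     # this is very inefficient, but i do not care
--     cost = 0
--     for (i, j) in section:
--         if (i-1, j) not in section:
--             cost += 1
--         if (i, j-1) not in section:
--             cost += 1
--         if (i+1, j) not in section:
--             cost += 1
--         if (i, j+1) not in section:
--             cost += 1
--     return cost
-- ===== SOURCE B (Python) =====
-- def fence_cost(section):
--     """Takes set of (i, j) tuples. Returns cost of fencing them."""
--     n = len(section)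
--     shared = 0
--     for (i, j) in section:
--         if (i+1, j) in section:
--             shared += 1
--         if (i, j+1) in section:
--             shared += 1
--     return 4*n - 2*shared
-- ===== Notes on version B (the rewrite author's own statement) =====
-- stated objective: alternative
-- what changed: Instead of counting the exposed sides of each cell with four neighbor tests, B counts each internal adjacency once via two directed neighbor tests per cell and returns 4*n - 2*shared.
import Mathlib
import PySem

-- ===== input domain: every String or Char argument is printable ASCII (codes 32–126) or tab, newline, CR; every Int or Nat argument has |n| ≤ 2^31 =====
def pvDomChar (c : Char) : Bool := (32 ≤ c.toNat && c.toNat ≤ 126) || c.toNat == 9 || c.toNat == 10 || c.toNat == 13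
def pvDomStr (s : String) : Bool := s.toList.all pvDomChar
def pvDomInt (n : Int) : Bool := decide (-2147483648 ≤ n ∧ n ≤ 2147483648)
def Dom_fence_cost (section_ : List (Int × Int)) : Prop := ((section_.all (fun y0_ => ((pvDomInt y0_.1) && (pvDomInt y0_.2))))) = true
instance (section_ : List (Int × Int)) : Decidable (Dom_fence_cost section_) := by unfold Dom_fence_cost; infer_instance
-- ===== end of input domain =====

-- B replaces per-cell counting of the four exposed sides by counting each internal
-- adjacency once (two directed neighbor tests per cell) and the closed form 4*n - 2*shared.


-- ===== PORT A =====
def fence_cost (section_ : List (Int × Int)) : Int :=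
  section_.foldl (fun cost c =>
    let cost := if (c.1 - 1, c.2) ∈ section_ then cost else cost + 1
    let cost := if (c.1, c.2 - 1) ∈ section_ then cost else cost + 1
    let cost := if (c.1 + 1, c.2) ∈ section_ then cost else cost + 1
    if (c.1, c.2 + 1) ∈ section_ then cost else cost + 1) 0

-- ===== PORT B =====
def fence_cost_alt (section_ : List (Int × Int)) : Int :=
  let n : Int := section_.length
  let shared : Int := section_.foldl (fun shared c =>
    let shared := if (c.1 + 1, c.2) ∈ section_ then shared + 1 else shared
    if (c.1, c.2 + 1) ∈ section_ then shared + 1 else shared) 0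
  4 * n - 2 * shared

-- ===== PRECONDITION & SPEC =====
-- The Python argument is a set of (i, j) pairs; its List model therefore has no
-- duplicate elements (Pre_ states exactly this set representation invariant).
def Pre_fence_cost (section_ : List (Int × Int)) : Prop := section_.Nodup
instance (section_ : List (Int × Int)) : Decidable (Pre_fence_cost section_) := by unfold Pre_fence_cost; infer_instance
def pvWitness_fence_cost : (List (Int × Int)) := [(0, 0), (0, 1), (1, 1)]
def Spec_fence_cost (section_ : List (Int × Int)) (out : Int) : Prop := out = fence_cost_alt section_
instance (section_ : List (Int × Int)) (out : Int) : Decidable (Spec_fence_cost section_ out) := by unfold Spec_fence_cost; infer_instance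

-- ===== CLAIM (what is proved, stated in full; the proofs are below) =====
def Claim_equal_fence_cost : Prop := ∀ (section_ : List (Int × Int)), Dom_fence_cost section_ → Pre_fence_cost section_ → Spec_fence_cost section_ (fence_cost section_)

-- ===== LEMMAS AND PROOFS =====

-- number of cells whose image under f stays in l equals number whose image under
-- the inverse g stays in l (bijection c ↦ f c on a duplicate-free list)
theorem countP_mem_shift {l : List (Int × Int)} (hnd : l.Nodup)
    (f g : (Int × Int) → (Int × Int))
    (hgf : ∀ x, g (f x) = x) (hfg : ∀ x, f (g x) = x) :
    l.countP (fun c => decide (f c ∈ l)) = l.countP (fun c => decide (g c ∈ l)) := by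
  have hinj : Function.Injective f := Function.LeftInverse.injective hgf
  have hcard : ∀ (p : (Int × Int) → Prop) [DecidablePred p],
      l.countP (fun c => decide (p c)) = (l.toFinset.filter p).card := by
    intro p _
    rw [List.countP_eq_length_filter, ← List.toFinset_card_of_nodup (hnd.filter _),
        List.toFinset_filter]
    simp
  rw [hcard (fun c => f c ∈ l), hcard (fun c => g c ∈ l)]
  have himg : l.toFinset.filter (fun c => g c ∈ l)
      = (l.toFinset.filter (fun c => f c ∈ l)).image f := by
    ext y
    simp only [Finset.mem_image, Finset.mem_filter, List.mem_toFinset]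
    constructor
    · rintro ⟨hy, hgy⟩
      exact ⟨g y, ⟨hgy, by rwa [hfg]⟩, hfg y⟩
    · rintro ⟨x, ⟨hx, hfx⟩, rfl⟩
      exact ⟨hfx, by rwa [hgf]⟩
  rw [himg, Finset.card_image_of_injective _ hinj]

theorem sum_ite_mem (l s : List (Int × Int)) (f : (Int × Int) → (Int × Int)) :
    (l.map (fun c => if f c ∈ s then (1 : Int) else 0)).sum
      = (l.countP (fun c => decide (f c ∈ s)) : Int) := by
  induction l with
  | nil => simp
  | cons x xs ih =>
    by_cases h : f x ∈ s <;> simp [List.countP_cons, h, ih] <;> push_cast <;> ring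

theorem sum_ite_not_mem (l s : List (Int × Int)) (f : (Int × Int) → (Int × Int)) :
    (l.map (fun c => if f c ∈ s then (0 : Int) else 1)).sum
      = (l.length : Int) - (l.countP (fun c => decide (f c ∈ s)) : Int) := by
  induction l with
  | nil => simp
  | cons x xs ih =>
    by_cases h : f x ∈ s <;> simp [List.countP_cons, h, ih] <;> push_cast <;> ring

theorem fence_cost_eq_sum (l : List (Int × Int)) :
    fence_cost l =
      ((l.map (fun c => if ((c.1 - 1, c.2) : Int × Int) ∈ l then (0 : Int) else 1)).sum
      + (l.map (fun c => if ((c.1, c.2 - 1) : Int × Int) ∈ l then (0 : Int) else 1)).sum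
      + (l.map (fun c => if ((c.1 + 1, c.2) : Int × Int) ∈ l then (0 : Int) else 1)).sum
      + (l.map (fun c => if ((c.1, c.2 + 1) : Int × Int) ∈ l then (0 : Int) else 1)).sum) := by
  unfold fence_cost
  have : (fun (cost : Int) (c : Int × Int) =>
      let cost := if (c.1 - 1, c.2) ∈ l then cost else cost + 1
      let cost := if (c.1, c.2 - 1) ∈ l then cost else cost + 1
      let cost := if (c.1 + 1, c.2) ∈ l then cost else cost + 1
      if (c.1, c.2 + 1) ∈ l then cost else cost + 1)
    = (fun (cost : Int) (c : Int × Int) => cost +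
        ((if ((c.1 - 1, c.2) : Int × Int) ∈ l then (0 : Int) else 1)
        + (if ((c.1, c.2 - 1) : Int × Int) ∈ l then (0 : Int) else 1)
        + (if ((c.1 + 1, c.2) : Int × Int) ∈ l then (0 : Int) else 1)
        + (if ((c.1, c.2 + 1) : Int × Int) ∈ l then (0 : Int) else 1))) := by
    funext cost c
    simp only []
    split_ifs <;> ring
  rw [this, PySem.List.foldl_add]
  rw [show (l.map (fun c =>
        (if ((c.1 - 1, c.2) : Int × Int) ∈ l then (0 : Int) else 1)
        + (if ((c.1, c.2 - 1) : Int × Int) ∈ l then (0 : Int) else 1)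
        + (if ((c.1 + 1, c.2) : Int × Int) ∈ l then (0 : Int) else 1)
        + (if ((c.1, c.2 + 1) : Int × Int) ∈ l then (0 : Int) else 1))).sum
    = ((l.map (fun c => if ((c.1 - 1, c.2) : Int × Int) ∈ l then (0 : Int) else 1)).sum
      + (l.map (fun c => if ((c.1, c.2 - 1) : Int × Int) ∈ l then (0 : Int) else 1)).sum
      + (l.map (fun c => if ((c.1 + 1, c.2) : Int × Int) ∈ l then (0 : Int) else 1)).sum
      + (l.map (fun c => if ((c.1, c.2 + 1) : Int × Int) ∈ l then (0 : Int) else 1)).sum) from ?_]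
  · ring
  · induction l with
    | nil => simp
    | cons x xs ih => simp_all; ring

theorem fence_cost_alt_eq_sum (l : List (Int × Int)) :
    fence_cost_alt l = 4 * (l.length : Int)
      - 2 * ((l.map (fun c => if ((c.1 + 1, c.2) : Int × Int) ∈ l then (1 : Int) else 0)).sum
           + (l.map (fun c => if ((c.1, c.2 + 1) : Int × Int) ∈ l then (1 : Int) else 0)).sum) := by
  unfold fence_cost_alt
  have : (fun (shared : Int) (c : Int × Int) =>
      let shared := if (c.1 + 1, c.2) ∈ l then shared + 1 else shared
      if (c.1, c.2 + 1) ∈ l then shared + 1 else shared)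
    = (fun (shared : Int) (c : Int × Int) => shared +
        ((if ((c.1 + 1, c.2) : Int × Int) ∈ l then (1 : Int) else 0)
        + (if ((c.1, c.2 + 1) : Int × Int) ∈ l then (1 : Int) else 0))) := by
    funext shared c
    simp only []
    split_ifs <;> ring
  rw [this, PySem.List.foldl_add]
  rw [show (l.map (fun c =>
        (if ((c.1 + 1, c.2) : Int × Int) ∈ l then (1 : Int) else 0)
        + (if ((c.1, c.2 + 1) : Int × Int) ∈ l then (1 : Int) else 0))).sum
    = ((l.map (fun c => if ((c.1 + 1, c.2) : Int × Int) ∈ l then (1 : Int) else 0)).sum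
      + (l.map (fun c => if ((c.1, c.2 + 1) : Int × Int) ∈ l then (1 : Int) else 0)).sum) from ?_]
  · ring
  · induction l with
    | nil => simp
    | cons x xs ih => simp_all; ring

-- ===== VERDICT (by name: the statement is the Claim_ definition above) =====
theorem fence_cost_spec : Claim_equal_fence_cost := by
  intro l _ hnd
  unfold Spec_fence_cost
  rw [fence_cost_eq_sum, fence_cost_alt_eq_sum]
  rw [sum_ite_not_mem l l (fun c => (c.1 - 1, c.2)),
      sum_ite_not_mem l l (fun c => (c.1, c.2 - 1)),
      sum_ite_not_mem l l (fun c => (c.1 + 1, c.2)),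
      sum_ite_not_mem l l (fun c => (c.1, c.2 + 1)),
      sum_ite_mem l l (fun c => (c.1 + 1, c.2)),
      sum_ite_mem l l (fun c => (c.1, c.2 + 1))]
  rw [countP_mem_shift hnd (fun c => (c.1 - 1, c.2)) (fun c => (c.1 + 1, c.2))
        (fun x => by simp) (fun x => by simp),
      countP_mem_shift hnd (fun c => (c.1, c.2 - 1)) (fun c => (c.1, c.2 + 1))
        (fun x => by simp) (fun x => by simp)]
  ring
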